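-- pv_equiv track=rewrite | github.com/pnnl/Radiopurity-database-assistant | dunetoolkit/query_class.py | _get_valid_meas_types
-- ===== SOURCE A (Python) =====
-- def _get_valid_meas_types(meas_val_terms, specified_meas_type):
--     """There are three different "type"s of measurements that a measurement result object could have: "measurement", "range", and "limit". The type of the measurement dictates what the numbers in the "value" field represent. If the type is "measurement" there should be two or three values: [central value, symmetric error] or [central value, positive asymmetric error, negative asymmetric error]. If the type is "range" there should be tow or three values: [lower limit, upper limit] or [lower limit, upper limit, confidence level]. If the type is "limit" there should be one to two values: [upper limit] or [upper limit, confidence level]. This means that if a user searched for a measurement result where the value equals x, no results of type "range" or "limit" should be returned because measurement results with these types contain values that are limits, not exact values. Thus, this function uses the comparison types of the value terms to determine how to constrain the "type" field in order to only return accurate results.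
--
--     args:
--         * meas_val_terms (list of dict): The list of terms, for a given group of consolidated measurement results terms, where the field is "value".
--         * specified_meas_type (str): The value specified for "type" if given in one of the terms in the group of consolidated measurement results terms (must be one of "measurement", "range", "limit", or None).
--
--     returns:
--         * list of str. The list of all "type" values that can be queried for.
--     """
--     if specified_meas_type is not None:
--         # if the query specifies to search for docs with a specific measurement type, then we only want to use that one
--         valid_meas_types = [specified_meas_type]
--     else:
--         # certain measurement types only support certain comparison types
--         val_comparisons = [ term['comparison'] for term in meas_val_terms if term['field'] == 'value' ]
--
--         if 'eq' in val_comparisons: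
--             # the "measurement" type is the only one with a single value that we can compare "eq" against
--             valid_meas_types = ['measurement']
--
--         elif 'gt' in val_comparisons or 'gte' in val_comparisons:
--             # the "limit" type only has an upper bound, so we have to exclude it from queries that include a "eq"/"gt"/"gte" comparison
--             valid_meas_types = ['measurement', 'range']
--
--         elif 'lt' in val_comparisons or 'lte' in val_comparisons:
--             # the "lt"/"lte" comparison can be done with any of the three measurement types
--             valid_meas_types = ['measurement', 'range', 'limit']
--
--         else:
--             valid_meas_types = []
--
--     return valid_meas_types
-- ===== SOURCE B (Python) =====
-- def _get_valid_meas_types(meas_val_terms, specified_meas_type):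
--     if specified_meas_type is not None:
--         return [specified_meas_type]
--     rank = {'eq': 0, 'gt': 1, 'gte': 1, 'lt': 2, 'lte': 2}
--     ranks = [rank[term['comparison']] for term in meas_val_terms
--              if term['field'] == 'value' and term['comparison'] in rank]
--     if not ranks:
--         return []
--     table = {0: ['measurement'], 1: ['measurement', 'range'], 2: ['measurement', 'range', 'limit']}
--     return list(table[min(ranks)])
-- ===== Notes on version B (the rewrite author's own statement) =====
-- stated objective: simpler
-- what changed: Replaces the if/elif membership cascade over the collected comparison list by a rank map (eq=0, gt/gte=1, lt/lte=2), a single comprehension collecting ranks, and a table lookup on the minimum rank.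
import Mathlib
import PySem

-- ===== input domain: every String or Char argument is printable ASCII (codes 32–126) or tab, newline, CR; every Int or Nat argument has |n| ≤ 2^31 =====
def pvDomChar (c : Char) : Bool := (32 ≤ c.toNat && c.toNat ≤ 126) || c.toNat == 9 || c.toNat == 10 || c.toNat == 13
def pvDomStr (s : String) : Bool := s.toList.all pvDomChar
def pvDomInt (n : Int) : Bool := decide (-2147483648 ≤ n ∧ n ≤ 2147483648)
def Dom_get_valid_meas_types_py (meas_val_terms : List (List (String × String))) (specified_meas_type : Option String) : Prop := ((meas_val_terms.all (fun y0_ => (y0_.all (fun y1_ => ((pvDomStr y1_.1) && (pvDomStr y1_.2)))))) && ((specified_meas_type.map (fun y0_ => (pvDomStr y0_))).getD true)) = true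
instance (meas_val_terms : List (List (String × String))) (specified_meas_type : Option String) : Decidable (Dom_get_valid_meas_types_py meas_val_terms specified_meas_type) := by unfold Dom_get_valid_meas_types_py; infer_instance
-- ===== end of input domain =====

-- B replaces A's if/elif membership cascade by a rank map (eq=0, gt/gte=1, lt/lte=2), a min over the
-- collected ranks and a table lookup; same cost, simpler decomposition.

-- ===== PORT A =====
-- dict lookup term['field'] / term['comparison'] is ported as first-match association-list lookup;
-- a missing key raises KeyError in Python, so Pre_ below restricts to inputs where the keys exist
-- (the .getD "" default is never reached inside Pre_).
def get_valid_meas_types_py (meas_val_terms : List (List (String × String))) (specified_meas_type : Option String) : List String :=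
  match specified_meas_type with
  | some t => [t]
  | none =>
    let val_comparisons :=
      (meas_val_terms.filter (fun term => ((term.lookup "field").getD "") == "value")).map
        (fun term => (term.lookup "comparison").getD "")
    if val_comparisons.contains "eq" then ["measurement"]
    else if val_comparisons.contains "gt" || val_comparisons.contains "gte" then ["measurement", "range"]
    else if val_comparisons.contains "lt" || val_comparisons.contains "lte" then ["measurement", "range", "limit"]
    else []

-- ===== PORT B =====
-- rank dictionary of Source B, as a function (lookup with 'in'-test = Option result)
def pvRank (c : String) : Option Int :=
  if c == "eq" then some 0
  else if c == "gt" then some 1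
  else if c == "gte" then some 1
  else if c == "lt" then some 2
  else if c == "lte" then some 2
  else none

-- table dictionary of Source B (its keys are exactly the possible min ranks 0, 1, 2)
def pvTable (r : Int) : List String :=
  if r == 0 then ["measurement"]
  else if r == 1 then ["measurement", "range"]
  else ["measurement", "range", "limit"]

def get_valid_meas_types_py_alt (meas_val_terms : List (List (String × String))) (specified_meas_type : Option String) : List String :=
  match specified_meas_type with
  | some t => [t]
  | none =>
    let ranks := meas_val_terms.filterMap (fun term =>
      if ((term.lookup "field").getD "") == "value" then pvRank ((term.lookup "comparison").getD "") else none)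
    match ranks.min? with
    | none => []
    | some r => pvTable r

-- ===== PRECONDITION & SPEC =====
-- Pre_ excludes exactly the inputs on which A raises KeyError: when specified_meas_type is None,
-- every term must have a 'field' key, and a 'comparison' key whenever its 'field' is 'value'.
def Pre_get_valid_meas_types_py (meas_val_terms : List (List (String × String))) (specified_meas_type : Option String) : Prop :=
  specified_meas_type.isSome = true ∨
    ∀ t ∈ meas_val_terms, (t.lookup "field").isSome = true ∧
      (t.lookup "field" = some "value" → (t.lookup "comparison").isSome = true)
instance (meas_val_terms : List (List (String × String))) (specified_meas_type : Option String) : Decidable (Pre_get_valid_meas_types_py meas_val_terms specified_meas_type) := by unfold Pre_get_valid_meas_types_py; infer_instance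
def pvWitness_get_valid_meas_types_py : (List (List (String × String))) × Option String :=
  ([[("field", "value"), ("comparison", "eq")]], none)

def Spec_get_valid_meas_types_py (meas_val_terms : List (List (String × String))) (specified_meas_type : Option String) (out : List String) : Prop := out = get_valid_meas_types_py_alt meas_val_terms specified_meas_type
instance (meas_val_terms : List (List (String × String))) (specified_meas_type : Option String) (out : List String) : Decidable (Spec_get_valid_meas_types_py meas_val_terms specified_meas_type out) := by unfold Spec_get_valid_meas_types_py; infer_instance

-- ===== CLAIM (what is proved, stated in full; the proofs are below) =====
def Claim_equal_get_valid_meas_types_py : Prop := ∀ (meas_val_terms : List (List (String × String))) (specified_meas_type : Option String), Dom_get_valid_meas_types_py meas_val_terms specified_meas_type → Pre_get_valid_meas_types_py meas_val_terms specified_meas_type → Spec_get_valid_meas_types_py meas_val_terms specified_meas_type (get_valid_meas_types_py meas_val_terms specified_meas_type)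

-- ===== LEMMAS AND PROOFS =====

-- B's comprehension over terms equals A's collected comparison list post-filtered through the rank map.
theorem pv_ranks_eq (l : List (List (String × String))) :
    l.filterMap (fun term =>
      if ((term.lookup "field").getD "") == "value" then pvRank ((term.lookup "comparison").getD "") else none)
    = ((l.filter (fun term => ((term.lookup "field").getD "") == "value")).map
        (fun term => (term.lookup "comparison").getD "")).filterMap pvRank := by
  induction l with
  | nil => rfl
  | cons h t ih =>
    rw [List.filterMap_cons]
    by_cases hp : (((h.lookup "field").getD "") == "value") = true
    · have hf : List.filter (fun term => ((term.lookup "field").getD "") == "value") (h :: t)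
          = h :: List.filter (fun term => ((term.lookup "field").getD "") == "value") t := by
        simp [hp]
      rw [hf, List.map_cons, List.filterMap_cons, if_pos hp]
      cases hr : pvRank ((h.lookup "comparison").getD "") with
      | none => exact ih
      | some r => rw [ih]
    · have hf : List.filter (fun term => ((term.lookup "field").getD "") == "value") (h :: t)
          = List.filter (fun term => ((term.lookup "field").getD "") == "value") t := by
        simp [hp]
      rw [hf, if_neg hp]
      exact ih

theorem pv_rank_zero (c : String) : pvRank c = some 0 ↔ c = "eq" := by
  unfold pvRank; split_ifs <;> simp_all

theorem pv_rank_one (c : String) : pvRank c = some 1 ↔ (c = "gt" ∨ c = "gte") := by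
  unfold pvRank; split_ifs <;> simp_all

theorem pv_rank_two (c : String) : pvRank c = some 2 ↔ (c = "lt" ∨ c = "lte") := by
  unfold pvRank; split_ifs <;> simp_all

theorem pv_rank_values (c : String) (r : Int) (h : pvRank c = some r) : r = 0 ∨ r = 1 ∨ r = 2 := by
  unfold pvRank at h; split_ifs at h <;> simp_all

-- the core equality: A's cascade on a comparison list = B's min/table on the ranks of that list
theorem pv_main (cs : List String) :
    (if cs.contains "eq" then ["measurement"]
     else if cs.contains "gt" || cs.contains "gte" then ["measurement", "range"]
     else if cs.contains "lt" || cs.contains "lte" then ["measurement", "range", "limit"]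
     else ([] : List String))
    = (match (cs.filterMap pvRank).min? with
       | none => []
       | some r => pvTable r) := by
  rcases hmin : (cs.filterMap pvRank).min? with _ | r
  · have he : cs.filterMap pvRank = [] := List.min?_eq_none_iff.mp hmin
    have h0 : "eq" ∉ cs := fun hc => by
      have : (0 : Int) ∈ cs.filterMap pvRank :=
        List.mem_filterMap.mpr ⟨_, hc, (pv_rank_zero _).mpr rfl⟩
      simp [he] at this
    have h1 : "gt" ∉ cs := fun hc => by
      have : (1 : Int) ∈ cs.filterMap pvRank :=
        List.mem_filterMap.mpr ⟨_, hc, (pv_rank_one _).mpr (Or.inl rfl)⟩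
      simp [he] at this
    have h2 : "gte" ∉ cs := fun hc => by
      have : (1 : Int) ∈ cs.filterMap pvRank :=
        List.mem_filterMap.mpr ⟨_, hc, (pv_rank_one _).mpr (Or.inr rfl)⟩
      simp [he] at this
    have h3 : "lt" ∉ cs := fun hc => by
      have : (2 : Int) ∈ cs.filterMap pvRank :=
        List.mem_filterMap.mpr ⟨_, hc, (pv_rank_two _).mpr (Or.inl rfl)⟩
      simp [he] at this
    have h4 : "lte" ∉ cs := fun hc => by
      have : (2 : Int) ∈ cs.filterMap pvRank :=
        List.mem_filterMap.mpr ⟨_, hc, (pv_rank_two _).mpr (Or.inr rfl)⟩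
      simp [he] at this
    simp [h0, h1, h2, h3, h4]
  · obtain ⟨hmem, hle⟩ := List.min?_eq_some_iff.mp hmin
    obtain ⟨c, hc, hpc⟩ := List.mem_filterMap.mp hmem
    have hr012 := pv_rank_values c r hpc
    by_cases h0 : "eq" ∈ cs
    · have hz : (0 : Int) ∈ cs.filterMap pvRank :=
        List.mem_filterMap.mpr ⟨_, h0, (pv_rank_zero _).mpr rfl⟩
      have hle0 : r ≤ 0 := hle _ hz
      have hr : r = 0 := by omega
      subst hr
      simp [h0, pvTable]
    · have hne0 : r ≠ 0 := by
        intro h; subst h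
        exact h0 ((pv_rank_zero c).mp hpc ▸ hc)
      by_cases h1 : ("gt" ∈ cs ∨ "gte" ∈ cs)
      · have ho : (1 : Int) ∈ cs.filterMap pvRank := by
          rcases h1 with h1 | h1
          · exact List.mem_filterMap.mpr ⟨_, h1, (pv_rank_one _).mpr (Or.inl rfl)⟩
          · exact List.mem_filterMap.mpr ⟨_, h1, (pv_rank_one _).mpr (Or.inr rfl)⟩
        have hle1 : r ≤ 1 := hle _ ho
        have hr : r = 1 := by omega
        subst hr
        rcases h1 with h1 | h1 <;> simp [h0, h1, pvTable]
      · rw [not_or] at h1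
        have hne1 : r ≠ 1 := by
          intro h; subst h
          rcases (pv_rank_one c).mp hpc with h | h
          · exact h1.1 (h ▸ hc)
          · exact h1.2 (h ▸ hc)
        by_cases h2 : ("lt" ∈ cs ∨ "lte" ∈ cs)
        · have ht : (2 : Int) ∈ cs.filterMap pvRank := by
            rcases h2 with h2 | h2
            · exact List.mem_filterMap.mpr ⟨_, h2, (pv_rank_two _).mpr (Or.inl rfl)⟩
            · exact List.mem_filterMap.mpr ⟨_, h2, (pv_rank_two _).mpr (Or.inr rfl)⟩
          have hle2 : r ≤ 2 := hle _ ht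
          have hr : r = 2 := by omega
          subst hr
          rcases h2 with h2 | h2 <;> simp [h0, h1.1, h1.2, h2, pvTable]
        · rw [not_or] at h2
          exfalso
          rcases hr012 with hr | hr | hr
          · exact hne0 hr
          · exact hne1 hr
          · subst hr
            rcases (pv_rank_two c).mp hpc with h | h
            · exact h2.1 (h ▸ hc)
            · exact h2.2 (h ▸ hc)

theorem pv_none (terms : List (List (String × String))) :
    get_valid_meas_types_py terms none = get_valid_meas_types_py_alt terms none := by
  have h := pv_main ((terms.filter (fun term => ((term.lookup "field").getD "") == "value")).map
      (fun term => (term.lookup "comparison").getD ""))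
  rw [← pv_ranks_eq] at h
  exact h

-- ===== VERDICT (by name: the statement is the Claim_ definition above) =====
theorem get_valid_meas_types_py_spec : Claim_equal_get_valid_meas_types_py := by
  intro meas_val_terms specified_meas_type _hdom _hpre
  cases specified_meas_type with
  | some t => exact rfl
  | none => exact pv_none meas_val_terms
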